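-- pv_equiv track=rewrite | github.com/jordie-lang/jordie-lang | interp/lexer.py | skip_comment
-- ===== SOURCE A (Python) =====
-- def skip_comment(s, ln, cc):
--     while(s):
--         if s.startswith("comment"):
--             s = s[7:]
--             cc += 7
--             break
--         elif s[0] == "\n" or s[0] == "\r" or s[0] == "\n\r" or s[0] == "\r\n":
--             ln += 1
--             cc = 1
--         else:
--             cc += 1
--         s = s[1:]
--     return (s, ln, cc)
-- ===== SOURCE B (Python) =====
-- def skip_comment(s, ln, cc):
--     idx = s.find("comment")
--     prefix = s if idx == -1 else s[:idx]
--     ln += sum(1 for ch in prefix if ch in "\n\r")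
--     k = 0
--     for ch in reversed(prefix):
--         if ch in "\n\r":
--             break
--         k += 1
--     if k == len(prefix):
--         cc += k
--     else:
--         cc = k + 1
--     if idx == -1:
--         return ("", ln, cc)
--     return (s[idx + 7:], ln, cc + 7)
-- ===== Notes on version B (the rewrite author's own statement) =====
-- stated objective: faster
-- what changed: Replaces A's char-by-char while-loop (which re-slices the string and updates line/column state every step) with a single s.find("comment"), a newline count over the scanned prefix, and a reversed scan to the last newline for the column.
import Mathlib
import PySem

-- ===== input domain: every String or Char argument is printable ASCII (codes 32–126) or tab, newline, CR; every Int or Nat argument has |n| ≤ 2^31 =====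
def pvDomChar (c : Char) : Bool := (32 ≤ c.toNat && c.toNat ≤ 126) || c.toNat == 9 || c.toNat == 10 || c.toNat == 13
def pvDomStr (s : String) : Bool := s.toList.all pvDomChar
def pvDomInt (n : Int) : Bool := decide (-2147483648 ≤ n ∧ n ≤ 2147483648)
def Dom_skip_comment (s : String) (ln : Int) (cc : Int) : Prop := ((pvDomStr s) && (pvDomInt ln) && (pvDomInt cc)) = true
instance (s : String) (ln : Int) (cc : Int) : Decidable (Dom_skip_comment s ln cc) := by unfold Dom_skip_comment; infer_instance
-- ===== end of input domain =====

-- B replaces A's char-by-char while-loop (which re-slices the string each step) by one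
-- s.find("comment") plus a newline count and a reversed scan for the column; objective: faster.

-- ===== PORT A =====
-- A's while-loop over the string; the Python tests s[0] == "\n\r" and s[0] == "\r\n"
-- are always False (s[0] is a single character) and drop out of the transliteration.
def pvSkipA : List Char → Int → Int → List Char × Int × Int
  | [], ln, cc => ([], ln, cc)
  | c :: rest, ln, cc =>
    if PySem.Chars.startswith (c :: rest) "comment".toList then
      (PySem.List.slice (c :: rest) (some 7) none, ln, cc + 7)      -- s = s[7:]; cc += 7; break
    else if c = '\n' ∨ c = '\r' then
      pvSkipA rest (ln + 1) 1                                      -- ln += 1; cc = 1; s = s[1:]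
    else
      pvSkipA rest ln (cc + 1)                                     -- cc += 1; s = s[1:]

def skip_comment (s : String) (ln : Int) (cc : Int) : String × Int × Int :=
  let r := pvSkipA s.toList ln cc
  (String.ofList r.1, r.2.1, r.2.2)

-- ===== PORT B =====
def pvIsNl (c : Char) : Bool := c == '\n' || c == '\r'              -- ch in "\n\r"

-- k = 0; for ch in reversed(prefix): if ch in "\n\r": break; k += 1
def pvAfterBreak : List Char → Nat
  | [] => 0
  | c :: rest => if pvIsNl c then 0 else pvAfterBreak rest + 1

def skip_comment_alt (s : String) (ln : Int) (cc : Int) : String × Int × Int :=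
  let cs := s.toList
  let idx := PySem.Chars.find cs "comment".toList                   -- s.find("comment")
  let pre := if idx = -1 then cs else PySem.List.slice cs none (some idx)   -- s[:idx]
  let ln' := ln + pre.foldl (fun a ch => if pvIsNl ch then a + 1 else a) (0 : Int)
  let k := pvAfterBreak pre.reverse
  let cc' := if k = pre.length then cc + (k : Int) else (k : Int) + 1
  if idx = -1 then ("", ln', cc')
  else (String.ofList (PySem.List.slice cs (some (idx + 7)) none), ln', cc' + 7)   -- s[idx+7:]

-- ===== PRECONDITION & SPEC =====
def Spec_skip_comment (s : String) (ln : Int) (cc : Int) (out : String × Int × Int) : Prop := out = skip_comment_alt s ln cc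
instance (s : String) (ln : Int) (cc : Int) (out : String × Int × Int) : Decidable (Spec_skip_comment s ln cc out) := by unfold Spec_skip_comment; infer_instance

-- ===== CLAIM (what is proved, stated in full; the proofs are below) =====
def Claim_equal_skip_comment : Prop := ∀ (s : String) (ln : Int) (cc : Int), Dom_skip_comment s ln cc → Spec_skip_comment s ln cc (skip_comment s ln cc)

-- ===== LEMMAS AND PROOFS =====

-- proof-side abbreviations for the two quantities B computes from the scanned prefix
def pvCnt (l : List Char) : Int := l.foldl (fun a ch => if pvIsNl ch then a + 1 else a) (0 : Int)
def pvCol (l : List Char) (cc : Int) : Int :=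
  if pvAfterBreak l.reverse = l.length then cc + (pvAfterBreak l.reverse : Int)
  else (pvAfterBreak l.reverse : Int) + 1

lemma pvCnt_acc (l : List Char) : ∀ (a : Int),
    l.foldl (fun a ch => if pvIsNl ch then a + 1 else a) a = a + pvCnt l := by
  induction l with
  | nil => intro a; simp [pvCnt]
  | cons c rest ih =>
    intro a
    conv_rhs => rw [pvCnt]
    simp only [List.foldl_cons]
    rw [ih, ih (if pvIsNl c then (0 : Int) + 1 else 0)]
    by_cases h : pvIsNl c <;> simp [h] <;> ring

lemma pvCnt_cons (c : Char) (l : List Char) :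
    pvCnt (c :: l) = (if pvIsNl c then 1 else 0) + pvCnt l := by
  show List.foldl _ (if pvIsNl c then (0 : Int) + 1 else 0) l = _
  rw [pvCnt_acc]
  by_cases h : pvIsNl c <;> simp [h] <;> ring

lemma pvAfterBreak_le (l : List Char) : pvAfterBreak l ≤ l.length := by
  induction l with
  | nil => simp [pvAfterBreak]
  | cons c rest ih =>
    simp only [pvAfterBreak, List.length_cons]
    by_cases h : pvIsNl c <;> simp [h] <;> omega

lemma pvAfterBreak_append (xs ys : List Char) :
    pvAfterBreak (xs ++ ys) =
      if pvAfterBreak xs = xs.length then xs.length + pvAfterBreak ys else pvAfterBreak xs := by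
  induction xs with
  | nil => simp [pvAfterBreak]
  | cons c rest ih =>
    simp only [List.cons_append, pvAfterBreak, List.length_cons]
    by_cases h : pvIsNl c
    · simp only [h, if_true]
      have := pvAfterBreak_le rest
      split_ifs <;> first | contradiction | omega
    · simp only [h, ih]
      split_ifs <;> first | contradiction | omega

lemma pvCol_nl (c : Char) (hc : pvIsNl c = true) (l : List Char) (cc : Int) :
    pvCol (c :: l) cc = pvCol l 1 := by
  have hle : pvAfterBreak l.reverse ≤ l.length := by
    simpa using pvAfterBreak_le l.reverse
  simp only [pvCol, List.reverse_cons, pvAfterBreak_append, List.length_reverse,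
    List.length_cons, pvAfterBreak, hc, if_true]
  split_ifs <;> push_cast <;> first | contradiction | omega

lemma pvCol_other (c : Char) (hc : pvIsNl c = false) (l : List Char) (cc : Int) :
    pvCol (c :: l) cc = pvCol l (cc + 1) := by
  have hle : pvAfterBreak l.reverse ≤ l.length := by
    simpa using pvAfterBreak_le l.reverse
  simp only [pvCol, List.reverse_cons, pvAfterBreak_append, List.length_reverse,
    List.length_cons, pvAfterBreak, hc]
  split_ifs <;> push_cast <;> first | contradiction | omega

lemma pvNl_iff (c : Char) : pvIsNl c = true ↔ (c = '\n' ∨ c = '\r') := by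
  simp [pvIsNl]

lemma pvNl_false (c : Char) (hc : ¬ (c = '\n' ∨ c = '\r')) : pvIsNl c = false := by
  rw [Bool.eq_false_iff]
  intro h1
  exact hc ((pvNl_iff c).mp h1)

-- A's loop when "comment" occurs nowhere in cs: the whole string is scanned.
lemma pvSkipA_noFind (cs : List Char) : ∀ (ln cc : Int),
    ¬ ("comment".toList <:+: cs) →
    pvSkipA cs ln cc = ([], ln + pvCnt cs, pvCol cs cc) := by
  induction cs with
  | nil => intro ln cc _; simp [pvSkipA, pvCnt, pvCol, pvAfterBreak]
  | cons c rest ih =>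
    intro ln cc h
    have hnp : ¬ ("comment".toList <+: (c :: rest)) := fun hp => h hp.isInfix
    have hsw : ¬ (PySem.Chars.startswith (c :: rest) "comment".toList = true) := by
      rw [PySem.Chars.startswith_iff]; exact hnp
    have hrest : ¬ ("comment".toList <:+: rest) := fun hi => h (List.infix_cons hi)
    rw [pvSkipA, if_neg hsw]
    by_cases hc : c = '\n' ∨ c = '\r'
    · have hb : pvIsNl c = true := (pvNl_iff c).mpr hc
      rw [if_pos hc, ih _ _ hrest, pvCnt_cons, pvCol_nl c hb]
      simp [hb]; ring_nf
    · have hb : pvIsNl c = false := pvNl_false c hc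
      rw [if_neg hc, ih _ _ hrest, pvCnt_cons, pvCol_other c hb]
      simp [hb]

-- A's loop when the first occurrence of "comment" is at position n.
lemma pvSkipA_walk (cs : List Char) : ∀ (n : Nat) (ln cc : Int),
    (∀ i, i < n → ¬ ("comment".toList <+: cs.drop i)) →
    ("comment".toList <+: cs.drop n) →
    pvSkipA cs ln cc = (cs.drop (n + 7), ln + pvCnt (cs.take n), pvCol (cs.take n) cc + 7) := by
  induction cs with
  | nil =>
    intro n ln cc _ hpre
    simp only [List.drop_nil] at hpre
    have : "comment".toList = ([] : List Char) := List.prefix_nil.mp hpre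
    simp at this
  | cons c rest ih =>
    intro n ln cc hmin hpre
    cases n with
    | zero =>
      simp only [List.drop_zero] at hpre
      have hsw : PySem.Chars.startswith (c :: rest) "comment".toList = true :=
        (PySem.Chars.startswith_iff _ _).mpr hpre
      rw [pvSkipA, if_pos hsw]
      rw [PySem.List.slice_from _ (by norm_num)]
      have h7 : (7 : Int).toNat = 7 := rfl
      norm_num [pvCnt, pvCol, pvAfterBreak, h7]
    | succ m =>
      have hnp : ¬ ("comment".toList <+: (c :: rest)) := by
        have := hmin 0 (Nat.succ_pos m); simpa using this
      have hsw : ¬ (PySem.Chars.startswith (c :: rest) "comment".toList = true) := by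
        rw [PySem.Chars.startswith_iff]; exact hnp
      have hmin' : ∀ i, i < m → ¬ ("comment".toList <+: rest.drop i) := by
        intro i hi
        have := hmin (i + 1) (by omega)
        simpa using this
      have hpre' : "comment".toList <+: rest.drop m := by simpa using hpre
      rw [pvSkipA, if_neg hsw]
      by_cases hc : c = '\n' ∨ c = '\r'
      · have hb : pvIsNl c = true := (pvNl_iff c).mpr hc
        rw [if_pos hc, ih _ _ _ hmin' hpre']
        simp only [List.take_succ_cons, List.drop_succ_cons, pvCnt_cons, pvCol_nl c hb]
        simp [hb]; ring_nf
      · have hb : pvIsNl c = false := pvNl_false c hc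
        rw [if_neg hc, ih _ _ _ hmin' hpre']
        simp only [List.take_succ_cons, List.drop_succ_cons, pvCnt_cons, pvCol_other c hb]
        simp [hb]

-- A's loop equals the find-based closed form, at the list level.
lemma pvMain (cs : List Char) (ln cc : Int) :
    pvSkipA cs ln cc =
      (if PySem.Chars.find cs "comment".toList = -1 then
        (([] : List Char), ln + pvCnt cs, pvCol cs cc)
      else
        (PySem.List.slice cs (some (PySem.Chars.find cs "comment".toList + 7)) none,
          ln + pvCnt (PySem.List.slice cs none (some (PySem.Chars.find cs "comment".toList))),
          pvCol (PySem.List.slice cs none (some (PySem.Chars.find cs "comment".toList))) cc + 7)) := by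
  by_cases h : PySem.Chars.find cs "comment".toList = -1
  · rw [if_pos h, pvSkipA_noFind cs ln cc ((PySem.Chars.find_eq_neg_one_iff _ _).mp h)]
  · rw [if_neg h]
    have h0 : 0 ≤ PySem.Chars.find cs "comment".toList := by
      have := PySem.Chars.neg_one_le_find cs "comment".toList
      omega
    obtain ⟨hpre, hmin⟩ := PySem.Chars.find_spec h0
    rw [pvSkipA_walk cs (PySem.Chars.find cs "comment".toList).toNat ln cc hmin hpre]
    rw [PySem.List.slice_to cs h0, PySem.List.slice_from cs (by omega)]
    have ht : (PySem.Chars.find cs "comment".toList + 7).toNat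
        = (PySem.Chars.find cs "comment".toList).toNat + 7 := by omega
    rw [ht]

-- ===== VERDICT (by name: the statement is the Claim_ definition above) =====
theorem skip_comment_spec : Claim_equal_skip_comment := by
  intro s ln cc _
  show skip_comment s ln cc = skip_comment_alt s ln cc
  show (String.ofList (pvSkipA s.toList ln cc).1,
        (pvSkipA s.toList ln cc).2.1, (pvSkipA s.toList ln cc).2.2) = skip_comment_alt s ln cc
  rw [pvMain s.toList ln cc]
  unfold skip_comment_alt
  by_cases h : PySem.Chars.find s.toList "comment".toList = -1
  · simp only [h, if_true]
    rfl
  · simp only [h, if_false]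
    rfl
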